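-- pv_equiv track=rewrite | github.com/sanju63030/intern_assignment | transform_ass.py | parse_events
-- ===== SOURCE A (Python) =====
-- def parse_events(lines):
--     events = []
--     event_section = False
--     for line in lines:
--         if line.strip().startswith('[Events]'):
--             event_section = True
--         elif event_section and line.strip().startswith('Dialogue:'):
--             events.append(line.strip())
--     return events
-- ===== SOURCE B (Python) =====
-- def parse_events(lines):
--     lines = list(lines)
--     idx = next((i for i, l in enumerate(lines)
--                 if l.strip().startswith('[Events]')), None)
--     if idx is None:
--         return []
--     return [l.strip() for l in lines[idx + 1:]
--             if l.strip().startswith('Dialogue:')]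
-- ===== Notes on version B (the rewrite author's own statement) =====
-- stated objective: idiomatic
-- what changed: Replaces the boolean-flag single pass with a find-then-filter decomposition: locate the first '[Events]' line, then a comprehension over the lines after it.
import Mathlib
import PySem

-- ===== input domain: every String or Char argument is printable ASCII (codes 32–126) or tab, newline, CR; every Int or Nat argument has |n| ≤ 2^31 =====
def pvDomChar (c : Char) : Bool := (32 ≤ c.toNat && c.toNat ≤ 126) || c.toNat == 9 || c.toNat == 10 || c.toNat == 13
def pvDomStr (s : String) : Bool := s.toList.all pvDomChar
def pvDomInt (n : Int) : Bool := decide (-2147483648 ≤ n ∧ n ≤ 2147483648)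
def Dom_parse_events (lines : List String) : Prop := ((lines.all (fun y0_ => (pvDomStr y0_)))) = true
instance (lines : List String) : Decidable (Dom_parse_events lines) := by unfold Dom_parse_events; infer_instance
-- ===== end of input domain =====

-- B replaces A's boolean-flag single pass with a find-the-[Events]-line-then-filter decomposition; objective: idiomatic.


-- ===== PORT A =====
def parse_events (lines : List String) : List String :=
  (lines.foldl
    (fun (st : List String × Bool) line =>
      if PySem.Str.startswith (PySem.Str.strip line) "[Events]" then (st.1, true)
      else if st.2 && PySem.Str.startswith (PySem.Str.strip line) "Dialogue:" then
        (st.1 ++ [PySem.Str.strip line], st.2)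
      else st)
    (([] : List String), false)).1

-- ===== PORT B =====
def parse_events_alt (lines : List String) : List String :=
  match lines.findIdx? (fun l => PySem.Str.startswith (PySem.Str.strip l) "[Events]") with
  | none => []
  | some i =>
    ((lines.drop (i + 1)).filter
        (fun l => PySem.Str.startswith (PySem.Str.strip l) "Dialogue:")).map PySem.Str.strip

-- ===== PRECONDITION & SPEC =====
def Spec_parse_events (lines : List String) (out : List String) : Prop := out = parse_events_alt lines
instance (lines : List String) (out : List String) : Decidable (Spec_parse_events lines out) := by unfold Spec_parse_events; infer_instance

-- ===== CLAIM (what is proved, stated in full; the proofs are below) =====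
def Claim_equal_parse_events : Prop := ∀ (lines : List String), Dom_parse_events lines → Spec_parse_events lines (parse_events lines)

-- ===== LEMMAS AND PROOFS =====

-- A's loop body, named for the lemmas.
def pvStepA (st : List String × Bool) (line : String) : List String × Bool :=
  if PySem.Str.startswith (PySem.Str.strip line) "[Events]" then (st.1, true)
  else if st.2 && PySem.Str.startswith (PySem.Str.strip line) "Dialogue:" then
    (st.1 ++ [PySem.Str.strip line], st.2)
  else st

lemma parse_events_eq_foldl (lines : List String) :
    parse_events lines = (lines.foldl pvStepA (([] : List String), false)).1 := rfl

-- A string whose strip starts with "[Events]" cannot also start with "Dialogue:".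
lemma ev_not_dlg (l : String)
    (h1 : PySem.Str.startswith (PySem.Str.strip l) "[Events]" = true) :
    PySem.Str.startswith (PySem.Str.strip l) "Dialogue:" = false := by
  by_contra h
  have h2 : PySem.Str.startswith (PySem.Str.strip l) "Dialogue:" = true := by
    cases hb : PySem.Str.startswith (PySem.Str.strip l) "Dialogue:" <;> simp_all
  simp at h1 h2
  rw [PySem.Chars.startswith_iff] at h1 h2
  obtain ⟨t1, e1⟩ := h1
  obtain ⟨t2, e2⟩ := h2
  rw [← e2] at e1
  simp at e1

-- Once the flag is true it stays true and every later Dialogue line is collected.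
lemma foldl_true (ls : List String) : ∀ (acc : List String),
    ls.foldl pvStepA (acc, true) =
      (acc ++ (ls.filter
          (fun l => PySem.Str.startswith (PySem.Str.strip l) "Dialogue:")).map PySem.Str.strip,
       true) := by
  induction ls with
  | nil => intro acc; simp
  | cons l tl ih =>
    intro acc
    by_cases hev : PySem.Str.startswith (PySem.Str.strip l) "[Events]" = true
    · have hd := ev_not_dlg l hev
      simp at hev hd
      simp [pvStepA, hev, hd, ih]
    · by_cases hdl : PySem.Str.startswith (PySem.Str.strip l) "Dialogue:" = true
      · simp at hev hdl
        simp [pvStepA, hev, hdl, ih]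
      · simp at hev hdl
        simp [pvStepA, hev, hdl, ih]

-- B on a list whose head is not an [Events] line.
lemma alt_cons_not_ev (l : String) (tl : List String)
    (hev : ¬ PySem.Str.startswith (PySem.Str.strip l) "[Events]" = true) :
    parse_events_alt (l :: tl) = parse_events_alt tl := by
  simp at hev
  unfold parse_events_alt
  rw [List.findIdx?_cons]
  cases h : tl.findIdx? (fun l => PySem.Str.startswith (PySem.Str.strip l) "[Events]") with
  | none => simp [h, hev]
  | some i => simp [h, hev, List.drop_succ_cons]

-- While the flag is false, A's loop computes acc ++ B.
lemma foldl_false (ls : List String) : ∀ (acc : List String),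
    (ls.foldl pvStepA (acc, false)).1 = acc ++ parse_events_alt ls := by
  induction ls with
  | nil => intro acc; simp [parse_events_alt]
  | cons l tl ih =>
    intro acc
    by_cases hev : PySem.Str.startswith (PySem.Str.strip l) "[Events]" = true
    · have halt : parse_events_alt (l :: tl) =
          (tl.filter
            (fun l => PySem.Str.startswith (PySem.Str.strip l) "Dialogue:")).map PySem.Str.strip := by
        unfold parse_events_alt
        rw [List.findIdx?_cons]
        simp at hev
        simp [hev]
      rw [halt]
      simp only [List.foldl_cons, pvStepA]
      simp at hev
      simp [hev, foldl_true]
    · rw [alt_cons_not_ev l tl hev]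
      have hstep : pvStepA (acc, false) l = (acc, false) := by
        simp at hev
        simp [pvStepA, hev]
      simp only [List.foldl_cons, hstep]
      exact ih acc

-- ===== VERDICT (by name: the statement is the Claim_ definition above) =====
theorem parse_events_spec : Claim_equal_parse_events := by
  intro lines _
  show parse_events lines = parse_events_alt lines
  rw [parse_events_eq_foldl, foldl_false]
  simp
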